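-- pv_equiv track=rewrite | github.com/olsenw/LeetCodeExercises | Python3/palindrome_partitioning.py | partition_fail
-- ===== SOURCE A (Python) =====
-- from typing import List
--
-- def partition_fail(s: str) -> List[List[str]]:
--     def palindrome(start, stop) -> bool:
--         l = stop - start + 1
--         for i in range(l//2):
--             if s[start + i] != s[stop - i]:
--                 return False
--         return True
--     ans = []
--     # length of partitions
--     for i in range(1, len(s)+1):
--         sub = []
--         # check subpartitions
--         start = 0
--         while start < len(s):
--             stop = start + i - 1
--             if stop >= len(s):
--                 stop = len(s) - 1
--             if palindrome(start, stop):
--                 sub.append(s[start:stop+1])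
--             start += i
--         if sub:
--             ans.append(sub)
--     return ans
-- ===== SOURCE B (Python) =====
-- from typing import List
--
-- def partition_fail(s: str) -> List[List[str]]:
--     n = len(s)
--     # DP palindrome table built once, bottom-up: pal[(a, b)] says s[a..b] is a
--     # palindrome; each entry costs O(1) via the (a+1, b-1) sub-entry, so the
--     # per-chunk character scan of the naive approach disappears entirely.
--     pal = {}
--     for a in range(n - 1, -1, -1):
--         for b in range(a, n):
--             pal[(a, b)] = s[a] == s[b] and (b - a < 2 or pal[(a + 1, b - 1)])
--     ans = []
--     for i in range(1, n + 1):
--         sub = [s[a:a + i] for a in range(0, n, i) if pal[(a, min(a + i, n) - 1)]]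
--         if sub:
--             ans.append(sub)
--     return ans
-- ===== Notes on version B (the rewrite author's own statement) =====
-- stated objective: alternative
-- what changed: B precomputes a bottom-up dynamic-programming palindrome table pal[(a,b)] once (each entry O(1) from the (a+1,b-1) entry), so the per-chunk character-comparison scan of A disappears and each chunk test is a single table lookup.
import Mathlib
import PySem

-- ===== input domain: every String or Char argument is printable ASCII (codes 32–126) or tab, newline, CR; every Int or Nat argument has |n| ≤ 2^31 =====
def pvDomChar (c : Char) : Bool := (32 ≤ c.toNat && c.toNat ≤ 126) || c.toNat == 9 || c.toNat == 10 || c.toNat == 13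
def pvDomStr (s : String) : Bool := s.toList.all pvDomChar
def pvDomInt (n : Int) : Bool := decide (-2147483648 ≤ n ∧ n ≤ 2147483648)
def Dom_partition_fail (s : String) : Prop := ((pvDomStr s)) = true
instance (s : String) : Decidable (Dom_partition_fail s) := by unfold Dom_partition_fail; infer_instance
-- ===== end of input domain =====

-- B replaces A's per-chunk character-comparison scan by a bottom-up DP palindrome table
-- pal[(a,b)] built once (each entry O(1) from the (a+1,b-1) entry); each chunk test becomes
-- a single table lookup (objective: alternative).

-- ===== PORT A =====
-- helper `palindrome(start, stop)`: the early-return-False loop is `all` over the same range.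
-- The indices `start + i` / `stop - i` are always in range when A calls this, so the `.getD ' '`
-- default is never used (Python would raise IndexError out of range; A never reaches that).
def pvPalA (cs : List Char) (start stop : Int) : Bool :=
  (PySem.List.pyRange 0 (PySem.Int.floordiv (stop - start + 1) 2) 1).all (fun i =>
    (PySem.List.pyGet? cs (start + i)).getD ' ' == (PySem.List.pyGet? cs (stop - i)).getD ' ')

-- the `while start < len(s)` loop; the `0 < i` conjunct is only the termination guard
-- (A only calls this with i ≥ 1, where Python's loop also terminates).
def pvChunksA (cs : List Char) (i : Int) (start : Int) (sub : List String) : List String :=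
  if _h : 0 < i ∧ start < (cs.length : Int) then
    pvChunksA cs i (start + i)
      (if pvPalA cs start
            (if start + i - 1 ≥ (cs.length : Int) then (cs.length : Int) - 1 else start + i - 1) then
         sub ++ [String.ofList (PySem.List.slice cs (some start)
           (some ((if start + i - 1 ≥ (cs.length : Int) then (cs.length : Int) - 1 else start + i - 1) + 1)))]
       else sub)
  else sub
termination_by ((cs.length : Int) - start).toNat
decreasing_by omega

def partition_fail (s : String) : List (List String) :=
  let cs := s.toList
  (PySem.List.pyRange 1 ((cs.length : Int) + 1) 1).foldl
    (fun ans i =>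
      let sub := pvChunksA cs i 0 []
      if sub ≠ [] then ans ++ [sub] else ans) []

-- ===== PORT B =====
-- Source B's inner DP assignment pal[(a, b)] = s[a] == s[b] and (b - a < 2 or pal[(a + 1, b - 1)]).
-- s[a], s[b] and the (a+1, b-1) lookup are always in range / present when Source B reaches them,
-- so the `.getD` defaults are never used (Python would raise IndexError/KeyError otherwise).
def pvStep (cs : List Char) (a : Int) (pal : PySem.Dict (Int × Int) Bool) (b : Int) :
    PySem.Dict (Int × Int) Bool :=
  pal.insert (a, b)
    (((PySem.List.pyGet? cs a).getD ' ' == (PySem.List.pyGet? cs b).getD ' ')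
      && (decide (b - a < 2) || (pal.get? (a + 1, b - 1)).getD false))

-- the two nested table-filling loops of Source B
def pvPalTab (cs : List Char) : PySem.Dict (Int × Int) Bool :=
  (PySem.List.pyRange ((cs.length : Int) - 1) (-1) (-1)).foldl
    (fun pal a => (PySem.List.pyRange a (cs.length : Int) 1).foldl (pvStep cs a) pal)
    PySem.Dict.empty

def partition_fail_alt (s : String) : List (List String) :=
  let cs := s.toList
  let n : Int := cs.length
  let pal := pvPalTab cs
  (PySem.List.pyRange 1 (n + 1) 1).foldl
    (fun ans i =>
      let sub := ((PySem.List.pyRange 0 n i).filter (fun a =>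
          (pal.get? (a, min (a + i) n - 1)).getD false)).map
        (fun a => String.ofList (PySem.List.slice cs (some a) (some (a + i))))
      if sub ≠ [] then ans ++ [sub] else ans) []

-- ===== PRECONDITION & SPEC =====
def Spec_partition_fail (s : String) (out : List (List String)) : Prop := out = partition_fail_alt s
instance (s : String) (out : List (List String)) : Decidable (Spec_partition_fail s out) := by unfold Spec_partition_fail; infer_instance

-- ===== CLAIM (what is proved, stated in full; the proofs are below) =====
def Claim_equal_partition_fail : Prop := ∀ (s : String), Dom_partition_fail s → Spec_partition_fail s (partition_fail s)

-- ===== LEMMAS AND PROOFS =====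

-- proof-side common form: for each length i, the palindromic chunks
def pvF (cs : List Char) (i : Int) : List String :=
  (((PySem.List.pyRange 0 (cs.length : Int) i).map
      (fun j => PySem.List.slice cs (some j) (some (j + i)))).filter
    (fun c => c == c.reverse)).map String.ofList

def pvMid (cs : List Char) : List (List String) :=
  ((PySem.List.pyRange 1 ((cs.length : Int) + 1) 1).filter
      (fun i => !(pvF cs i).isEmpty)).map (pvF cs)

-- the palindrome predicate on the segment cs[a..b] (Nat indices, inclusive)
def isPalN (cs : List Char) (a b : Nat) : Bool :=
  ((cs.drop a).take (b + 1 - a)) == ((cs.drop a).take (b + 1 - a)).reverse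

-- a stepped range peels its first element
lemma pyRange_cons_of_pos (a b s : Int) (hs : 0 < s) (h : a < b) :
    PySem.List.pyRange a b s = a :: PySem.List.pyRange (a + s) b s := by
  rw [PySem.List.pyRange_of_pos _ _ hs, PySem.List.pyRange_of_pos _ _ hs]
  have hcount : ((b - a + s - 1) / s).toNat = ((b - (a + s) + s - 1) / s).toNat + 1 := by
    have h1 : b - a + s - 1 = (b - (a + s) + s - 1) + 1 * s := by ring
    rw [h1, Int.add_mul_ediv_right _ _ (by omega)]
    have h2 : 0 ≤ (b - (a + s) + s - 1) / s := Int.ediv_nonneg (by omega) (by omega)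
    omega
  rw [if_pos h, hcount, List.range_succ_eq_map, List.map_cons, List.map_map]
  congr 1
  · push_cast; ring
  · by_cases h2 : a + s < b
    · rw [if_pos h2]
      apply List.map_congr_left
      intro k _
      simp only [Function.comp_apply, Nat.succ_eq_add_one]
      push_cast
      ring
    · rw [if_neg h2]
      have hz : ((b - (a + s) + s - 1) / s).toNat = 0 := by
        have hlt : (b - (a + s) + s - 1) / s < 1 := by
          apply Int.ediv_lt_of_lt_mul hs; omega
        have h2' : 0 ≤ (b - (a + s) + s - 1) / s := Int.ediv_nonneg (by omega) (by omega)
        omega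
      simp [hz]

-- the half-length comparison loop decides t = t.reverse
lemma pal_half (t : List Char) :
    ((List.range (t.length / 2)).all (fun k =>
        ((t[k]?).getD ' ' == (t[t.length - 1 - k]?).getD ' '))) = (t == t.reverse) := by
  rw [Bool.eq_iff_iff]
  simp only [List.all_eq_true, List.mem_range, beq_iff_eq]
  constructor
  · intro hhalf
    apply List.ext_getElem (by simp)
    intro k h1 h2
    rw [List.getElem_reverse]
    have key : ∀ m, (hm : m < t.length / 2) → t[m]'(by omega) = t[t.length - 1 - m]'(by omega) := by
      intro m hm
      have := hhalf m hm
      rwa [List.getElem?_eq_getElem (by omega), List.getElem?_eq_getElem (by omega),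
        Option.getD_some, Option.getD_some] at this
    by_cases hk : k < t.length / 2
    · exact key k hk
    · by_cases hk2 : t.length - 1 - k < t.length / 2
      · have hkey := key _ hk2
        have he : t.length - 1 - (t.length - 1 - k) = k := by omega
        simp only [he] at hkey
        exact hkey.symm
      · congr 1; omega
  · intro heq k hk
    have h1 : k < t.length := by omega
    have h2 : t.length - 1 - k < t.length := by omega
    have hopt : t[k]? = t.reverse[k]? := by rw [← heq]
    rw [List.getElem?_eq_getElem h1, List.getElem?_eq_getElem (by simpa using h1),
      List.getElem_reverse] at hopt
    rw [List.getElem?_eq_getElem h1, List.getElem?_eq_getElem h2, Option.getD_some,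
      Option.getD_some]
    exact Option.some.inj hopt

-- the chunk of A (clamped stop) and of B (overshooting slice) are the same list
lemma chunk_eq (cs : List Char) (st ii : Nat) (hst : st < cs.length) (hii : 1 ≤ ii) :
    PySem.List.slice cs (some (st : Int)) (some ((min (st + ii) cs.length : Nat) : Int))
      = PySem.List.slice cs (some (st : Int)) (some ((st : Int) + (ii : Int))) := by
  have hcast : (st : Int) + (ii : Int) = ((st + ii : Nat) : Int) := by push_cast; ring
  rw [hcast, PySem.List.slice_natCast, PySem.List.slice_natCast]
  apply List.ext_getElem
  · simp; omega
  · intro k h1 h2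
    rw [List.getElem_take, List.getElem_take]

-- A's palindrome check on the clamped bounds equals the reversal test on the chunk
lemma pal_eq (cs : List Char) (st ii : Nat) (hst : st < cs.length) (hii : 1 ≤ ii) :
    pvPalA cs (st : Int) (((min (st + ii) cs.length : Nat) : Int) - 1)
      = (PySem.List.slice cs (some (st : Int)) (some ((st : Int) + (ii : Int)))
          == (PySem.List.slice cs (some (st : Int)) (some ((st : Int) + (ii : Int)))).reverse) := by
  set t := PySem.List.slice cs (some (st : Int)) (some ((st : Int) + (ii : Int))) with ht
  have hcast : (st : Int) + (ii : Int) = ((st + ii : Nat) : Int) := by push_cast; ring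
  have htdef : t = (cs.drop st).take ii := by
    rw [ht, hcast, PySem.List.slice_natCast]
    have : st + ii - st = ii := by omega
    rw [this]
  have hL : t.length = min ii (cs.length - st) := by
    rw [htdef]; simp only [List.length_take, List.length_drop]
  have hLpos : 1 ≤ t.length := by omega
  have hstop : ((min (st + ii) cs.length : Nat) : Int) - 1 = ((st + t.length - 1 : Nat) : Int) := by
    push_cast; omega
  rw [← pal_half t]
  unfold pvPalA
  rw [hstop]
  have hl2 : ((st + t.length - 1 : Nat) : Int) - (st : Int) + 1 = ((t.length : Nat) : Int) := by
    omega
  rw [hl2]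
  have hfd : PySem.Int.floordiv ((t.length : Nat) : Int) 2 = ((t.length / 2 : Nat) : Int) := by
    exact_mod_cast PySem.Int.floordiv_natCast t.length 2
  rw [hfd, PySem.List.pyRange_zero_natCast, List.all_map]
  have hpt : ∀ k, k < t.length / 2 →
      ((fun i => (PySem.List.pyGet? cs ((st : Int) + i)).getD ' '
          == (PySem.List.pyGet? cs (((st + t.length - 1 : Nat) : Int) - i)).getD ' ')
        ∘ (fun k : Nat => (k : Int))) k
        = ((t[k]?).getD ' ' == (t[t.length - 1 - k]?).getD ' ') := by
    intro k hk
    have hk1 : st + k < cs.length := by omega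
    have hk2 : st + (t.length - 1 - k) < cs.length := by omega
    have e1 : (st : Int) + ((k : Nat) : Int) = ((st + k : Nat) : Int) := by push_cast; ring
    have e2 : ((st + t.length - 1 : Nat) : Int) - ((k : Nat) : Int)
        = ((st + (t.length - 1 - k) : Nat) : Int) := by push_cast; omega
    simp only [Function.comp_apply]
    rw [e1, e2, PySem.List.pyGet?_natCast, PySem.List.pyGet?_natCast,
      List.getElem?_eq_getElem hk1, List.getElem?_eq_getElem hk2,
      List.getElem?_eq_getElem (by omega : k < t.length),
      List.getElem?_eq_getElem (by omega : t.length - 1 - k < t.length)]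
    have g1 : t[k]'(by omega) = cs[st + k]'hk1 := by
      simp only [htdef]
      rw [List.getElem_take, List.getElem_drop]
    have g2 : t[t.length - 1 - k]'(by omega) = cs[st + (t.length - 1 - k)]'hk2 := by
      simp only [htdef]
      rw [List.getElem_take, List.getElem_drop]
    rw [Option.getD_some, Option.getD_some, Option.getD_some, Option.getD_some, g1, g2]
  rw [Bool.eq_iff_iff]
  simp only [List.all_eq_true, List.mem_range]
  constructor
  · intro hall k hk
    rw [← hpt k hk]
    exact hall k hk
  · intro hall k hk
    rw [hpt k hk]
    exact hall k hk

-- A's while-loop equals the map/filter over the stepped range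
lemma chunks_eq (cs : List Char) (ii : Nat) (hii : 1 ≤ ii) :
    ∀ (fuel st : Nat), cs.length - st ≤ fuel → ∀ (acc : List String),
    pvChunksA cs (ii : Int) (st : Int) acc
      = acc ++ (((PySem.List.pyRange (st : Int) (cs.length : Int) (ii : Int)).map
            (fun j => PySem.List.slice cs (some j) (some (j + (ii : Int))))).filter
          (fun c => c == c.reverse)).map String.ofList := by
  intro fuel
  induction fuel with
  | zero =>
    intro st hst acc
    have hge : ¬ ((st : Int) < (cs.length : Int)) := by omega
    rw [pvChunksA, dif_neg (by omega)]
    rw [PySem.List.pyRange_of_pos _ _ (by exact_mod_cast hii), if_neg hge]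
    simp
  | succ n ih =>
    intro st hst acc
    by_cases hlt : st < cs.length
    · rw [pvChunksA, dif_pos ⟨by exact_mod_cast hii, by exact_mod_cast hlt⟩]
      have hclamp : (if (st : Int) + (ii : Int) - 1 ≥ (cs.length : Int)
            then (cs.length : Int) - 1 else (st : Int) + (ii : Int) - 1)
          = ((min (st + ii) cs.length : Nat) : Int) - 1 := by
        split_ifs <;> [skip; skip] <;> push_cast <;> omega
      have hstop1 : ((min (st + ii) cs.length : Nat) : Int) - 1 + 1
          = ((min (st + ii) cs.length : Nat) : Int) := by ring
      rw [hclamp, hstop1, pal_eq cs st ii hlt hii, chunk_eq cs st ii hlt hii]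
      rw [pyRange_cons_of_pos _ _ _ (by exact_mod_cast hii) (by exact_mod_cast hlt),
        List.map_cons, List.filter_cons]
      have hnext : (st : Int) + (ii : Int) = ((st + ii : Nat) : Int) := by push_cast; ring
      rw [hnext, ih (st + ii) (by omega)]
      by_cases hp : (PySem.List.slice cs (some (st : Int)) (some ((st : Int) + (ii : Int)))
          == (PySem.List.slice cs (some (st : Int)) (some ((st : Int) + (ii : Int)))).reverse) = true
      · rw [hnext] at hp
        rw [if_pos hp, hp, if_pos rfl, List.map_cons]
        simp [List.append_assoc]
      · rw [hnext] at hp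
        rw [if_neg hp, Bool.eq_false_iff.mpr hp, if_neg (by simp)]
    · rw [pvChunksA, dif_neg (by omega)]
      rw [PySem.List.pyRange_of_pos _ _ (by exact_mod_cast hii),
        if_neg (by omega)]
      simp

-- A equals the common form
lemma A_eq_mid (s : String) : partition_fail s = pvMid s.toList := by
  unfold partition_fail pvMid
  simp only []
  set cs := s.toList with hcs
  rw [PySem.List.foldl_congr_mem _ _
      (fun ans i => if (!(pvChunksA cs i 0 []).isEmpty) = true
        then ans ++ [pvChunksA cs i 0 []] else ans) []
      (by
        intro acc i _
        simp only []
        split_ifs with h1 h2 <;> simp_all)]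
  rw [PySem.List.foldl_append_if (fun i => !(pvChunksA cs i 0 []).isEmpty)
      (fun i => pvChunksA cs i 0 []) _ []]
  rw [List.nil_append]
  have hfeq : ∀ i ∈ PySem.List.pyRange 1 ((cs.length : Int) + 1) 1,
      pvChunksA cs i 0 [] = pvF cs i := by
    intro i hi
    rw [PySem.List.mem_pyRange_one] at hi
    obtain ⟨ii, rfl⟩ : ∃ ii : Nat, i = (ii : Int) := ⟨i.toNat, by omega⟩
    have hii : 1 ≤ ii := by exact_mod_cast hi.1
    have h0 : (0 : Int) = ((0 : Nat) : Int) := rfl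
    unfold pvF
    rw [h0, chunks_eq cs ii hii cs.length 0 (by omega), List.nil_append]
  rw [List.filter_congr (fun i hi => by rw [hfeq i hi])]
  apply List.map_congr_left
  intro i hi
  exact hfeq i (List.mem_of_mem_filter hi)

-- ===== the DP table =====

-- peeling both ends of a palindrome test
lemma beq_reverse_cons_concat (x y : Char) (m : List Char) :
    ((x :: (m ++ [y])) == (x :: (m ++ [y])).reverse) = ((x == y) && (m == m.reverse)) := by
  rw [Bool.eq_iff_iff]
  simp only [beq_iff_eq, Bool.and_eq_true, List.reverse_cons, List.reverse_append,
    List.reverse_cons, List.reverse_nil, List.nil_append]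
  constructor
  · intro h
    have h1 := List.head_eq_of_cons_eq h
    subst h1
    have h2 := List.tail_eq_of_cons_eq h
    have h3 : m ++ [x] = m.reverse ++ [x] := by simpa using h2
    have h4 := List.append_cancel_right h3
    exact ⟨rfl, h4⟩
  · rintro ⟨rfl, hm⟩
    rw [← hm]
    simp
lemma isPalN_rec (cs : List Char) (a b : Nat) (hab : a ≤ b) (hb : b < cs.length) :
    isPalN cs a b = ((cs[a]'(lt_of_le_of_lt hab hb) == cs[b]'hb)
      && (decide (b - a < 2) || isPalN cs (a + 1) (b - 1))) := by
  have hdrop : cs.drop a = cs[a]'(lt_of_le_of_lt hab hb) :: cs.drop (a + 1) :=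
    (List.getElem_cons_drop (lt_of_le_of_lt hab hb)).symm
  by_cases h2 : b - a < 2
  · rw [decide_eq_true h2, Bool.true_or, Bool.and_true]
    unfold isPalN
    rcases Nat.lt_or_ge a b with hlt | hge
    · -- b = a + 1
      have hb1 : b = a + 1 := by omega
      subst hb1
      have hdrop2 : cs.drop (a + 1) = cs[a + 1]'hb :: cs.drop (a + 2) :=
        (List.getElem_cons_drop hb).symm
      rw [hdrop, hdrop2]
      have : a + 1 + 1 - a = 2 := by omega
      rw [this]
      simp only [List.take_succ_cons, List.take_succ_cons, List.take_zero]
      rw [Bool.eq_iff_iff]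
      simp only [beq_iff_eq, List.reverse_cons, List.reverse_nil, List.nil_append,
        List.cons_append]
      constructor
      · intro h; exact (List.head_eq_of_cons_eq h)
      · intro h; rw [h]
    · -- b = a
      have he1 : b + 1 - a = 1 := by omega
      have hab' : cs[a]'(lt_of_le_of_lt hab hb) = cs[b]'hb := by
        congr 1
        omega
      rw [hdrop, he1]
      simp [hab']
  · rw [decide_eq_false h2, Bool.false_or]
    have hge2 : a + 2 ≤ b := by omega
    have hsplit : (cs.drop a).take (b + 1 - a)
        = cs[a]'(lt_of_le_of_lt hab hb)
          :: ((cs.drop (a + 1)).take (b - 1 + 1 - (a + 1)) ++ [cs[b]'hb]) := by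
      rw [hdrop]
      have h1 : b + 1 - a = (b - a - 1) + 1 + 1 := by omega
      rw [h1, List.take_succ_cons]
      congr 1
      have h3 : b - 1 + 1 - (a + 1) = b - a - 1 := by omega
      rw [h3, List.take_add_one]
      congr 1
      have hidx : a + 1 + (b - a - 1) = b := by omega
      have hlen : b - a - 1 < (cs.drop (a + 1)).length := by
        rw [List.length_drop]; omega
      rw [List.getElem?_eq_getElem hlen, List.getElem_drop, Option.toList_some]
      congr 2
    unfold isPalN
    rw [hsplit, beq_reverse_cons_concat]

-- invariant preserved by the inner (b) loop of the table build
lemma inner_tab (cs : List Char) (a : Nat) (ha : a < cs.length)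
    (d : PySem.Dict (Int × Int) Bool)
    (hInv : ∀ a' b' : Nat, a < a' → a' ≤ b' → b' < cs.length →
      d.get? ((a' : Int), (b' : Int)) = some (isPalN cs a' b')) :
    ∀ k : Nat, a + k ≤ cs.length →
      (∀ p : Int × Int, p.1 ≠ (a : Int) →
        ((PySem.List.pyRange (a : Int) ((a + k : Nat) : Int) 1).foldl (pvStep cs (a : Int)) d).get? p
          = d.get? p) ∧
      (∀ b' : Nat, a ≤ b' → b' < a + k →
        ((PySem.List.pyRange (a : Int) ((a + k : Nat) : Int) 1).foldl (pvStep cs (a : Int)) d).get?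
            ((a : Int), (b' : Int)) = some (isPalN cs a b')) := by
  intro k
  induction k with
  | zero =>
    intro _
    rw [PySem.List.pyRange_one_eq_nil (by omega)]
    exact ⟨fun p _ => rfl, fun b' h1 h2 => absurd h2 (by omega)⟩
  | succ k ih =>
    intro hk
    obtain ⟨ihA, ihB⟩ := ih (by omega)
    have hsr : PySem.List.pyRange (a : Int) ((a + (k + 1) : Nat) : Int) 1
        = PySem.List.pyRange (a : Int) ((a + k : Nat) : Int) 1 ++ [((a + k : Nat) : Int)] := by
      have hc : ((a + (k + 1) : Nat) : Int) = ((a + k : Nat) : Int) + 1 := by push_cast; ring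
      rw [hc, PySem.List.pyRange_one_succ_right (by exact_mod_cast Nat.le_add_right a k)]
    rw [hsr, List.foldl_append, List.foldl_cons, List.foldl_nil]
    set dk := (PySem.List.pyRange (a : Int) ((a + k : Nat) : Int) 1).foldl (pvStep cs (a : Int)) d
      with hdk
    -- the value inserted for key (a, a+k) is isPalN cs a (a+k)
    have hb : a + k < cs.length := by omega
    have hval : (((PySem.List.pyGet? cs (a : Int)).getD ' '
          == (PySem.List.pyGet? cs ((a + k : Nat) : Int)).getD ' ')
        && (decide (((a + k : Nat) : Int) - (a : Int) < 2)
            || (dk.get? ((a : Int) + 1, ((a + k : Nat) : Int) - 1)).getD false))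
        = isPalN cs a (a + k) := by
      rw [PySem.List.pyGet?_natCast, PySem.List.pyGet?_natCast,
        List.getElem?_eq_getElem ha, List.getElem?_eq_getElem hb,
        Option.getD_some, Option.getD_some]
      have hdec : decide (((a + k : Nat) : Int) - (a : Int) < 2) = decide (a + k - a < 2) := by
        rw [decide_eq_decide]; omega
      rw [hdec, isPalN_rec cs a (a + k) (by omega) hb]
      by_cases h2 : a + k - a < 2
      · rw [decide_eq_true h2]
        simp
      · rw [decide_eq_false h2, Bool.false_or, Bool.false_or]
        have e1 : (a : Int) + 1 = ((a + 1 : Nat) : Int) := by push_cast; ring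
        have e2 : ((a + k : Nat) : Int) - 1 = ((a + k - 1 : Nat) : Int) := by push_cast; omega
        rw [e1, e2, ihA ((((a + 1 : Nat) : Int)), (((a + k - 1 : Nat) : Int)))
            (by simp only []; intro hcon; exact absurd (by exact_mod_cast hcon) (by omega)),
          hInv (a + 1) (a + k - 1) (by omega) (by omega) (by omega), Option.getD_some]
    constructor
    · intro p hp
      unfold pvStep
      rw [PySem.Dict.get?_insert, if_neg (by
          intro hcon
          exact hp (by rw [hcon]))]
      exact ihA p hp
    · intro b' h1 h2
      unfold pvStep
      by_cases hb' : b' = a + k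
      · subst hb'
        rw [PySem.Dict.get?_insert, if_pos rfl, hval]
      · rw [PySem.Dict.get?_insert, if_neg (by
            intro hcon
            have : (b' : Int) = ((a + k : Nat) : Int) := (Prod.mk.injEq _ _ _ _).mp hcon |>.2
            exact hb' (by exact_mod_cast this))]
        exact ihB b' h1 (by omega)

-- the outer (a) countdown loop fills every entry
lemma outer_tab (cs : List Char) :
    ∀ a : Nat, a ≤ cs.length →
    ∀ d : PySem.Dict (Int × Int) Bool,
      (∀ a' b' : Nat, a ≤ a' → a' ≤ b' → b' < cs.length →
        d.get? ((a' : Int), (b' : Int)) = some (isPalN cs a' b')) →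
    ∀ a' b' : Nat, a' ≤ b' → b' < cs.length →
      ((PySem.List.pyRange ((a : Nat) - 1 : Int) (-1) (-1)).foldl
          (fun pal x => (PySem.List.pyRange x (cs.length : Int) 1).foldl (pvStep cs x) pal)
          d).get? ((a' : Int), (b' : Int)) = some (isPalN cs a' b') := by
  intro a
  induction a with
  | zero =>
    intro _ d hInv a' b' h1 h2
    rw [PySem.List.pyRange_neg_one_eq_nil (by norm_num), List.foldl_nil]
    exact hInv a' b' (Nat.zero_le _) h1 h2
  | succ a ih =>
    intro ha d hInv a' b' h1 h2
    have hstep : ((a + 1 : Nat) : Int) - 1 = (a : Nat) := by push_cast; ring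
    rw [hstep, PySem.List.pyRange_neg_one_cons (by omega), List.foldl_cons]
    have halen : a < cs.length := by omega
    have hinner := inner_tab cs a halen d
      (fun a'' b'' hgt hle hlt => hInv a'' b'' (by omega) hle hlt)
      (cs.length - a) (by omega)
    have hcl : ((a + (cs.length - a) : Nat) : Int) = (cs.length : Int) := by push_cast; omega
    rw [hcl] at hinner
    refine ih (by omega) _ ?_ a' b' h1 h2
    intro a'' b'' hge hle hlt
    by_cases heq : a'' = a
    · subst heq
      exact hinner.2 b'' hle (by omega)
    · rw [hinner.1 (((a'' : Nat) : Int), ((b'' : Nat) : Int))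
        (by simp only []; intro hcon; exact heq (by exact_mod_cast hcon))]
      exact hInv a'' b'' (by omega) hle hlt

lemma tab_correct (cs : List Char) (a b : Nat) (h1 : a ≤ b) (h2 : b < cs.length) :
    (pvPalTab cs).get? ((a : Int), (b : Int)) = some (isPalN cs a b) := by
  unfold pvPalTab
  have hc : (cs.length : Int) - 1 = ((cs.length : Nat) : Int) - 1 := rfl
  rw [hc]
  exact outer_tab cs cs.length le_rfl PySem.Dict.empty
    (fun a' b' hge hle hlt => absurd (lt_of_le_of_lt hle hlt) (by omega)) a b h1 h2

-- B's table lookup for a chunk equals the reversal test on that chunk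
lemma lookup_eq (cs : List Char) (a i : Nat) (ha : a < cs.length) (hi : 1 ≤ i) :
    ((pvPalTab cs).get? ((a : Int), min ((a : Int) + (i : Int)) (cs.length : Int) - 1)).getD false
      = (PySem.List.slice cs (some (a : Int)) (some ((a : Int) + (i : Int)))
          == (PySem.List.slice cs (some (a : Int)) (some ((a : Int) + (i : Int)))).reverse) := by
  have hkey : min ((a : Int) + (i : Int)) (cs.length : Int) - 1
      = ((min (a + i) cs.length - 1 : Nat) : Int) := by
    have hc : (a : Int) + (i : Int) = ((a + i : Nat) : Int) := by push_cast; ring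
    have hM : 1 ≤ min (a + i) cs.length := le_min (by omega) (by omega)
    rw [hc, ← Nat.cast_min, Int.natCast_sub hM]
    rfl
  have h1 : a ≤ min (a + i) cs.length - 1 := by omega
  have h2 : min (a + i) cs.length - 1 < cs.length := by omega
  rw [hkey, tab_correct cs a (min (a + i) cs.length - 1) h1 h2, Option.getD_some]
  have hcast : (a : Int) + (i : Int) = ((a + i : Nat) : Int) := by push_cast; ring
  have hseg : (cs.drop a).take (min (a + i) cs.length - 1 + 1 - a)
      = PySem.List.slice cs (some (a : Int)) (some ((a : Int) + (i : Int))) := by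
    rw [hcast, PySem.List.slice_natCast]
    apply List.ext_getElem
    · simp only [List.length_take, List.length_drop]
      omega
    · intro k hk1 hk2
      rw [List.getElem_take, List.getElem_take]
  unfold isPalN
  rw [hseg]

-- B equals the common form
lemma B_eq_mid (s : String) : partition_fail_alt s = pvMid s.toList := by
  unfold partition_fail_alt pvMid
  simp only []
  set cs := s.toList with hcs
  set subB := fun i : Int => ((PySem.List.pyRange 0 (cs.length : Int) i).filter (fun a =>
      ((pvPalTab cs).get? (a, min (a + i) (cs.length : Int) - 1)).getD false)).map
    (fun a => String.ofList (PySem.List.slice cs (some a) (some (a + i)))) with hsubB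
  rw [PySem.List.foldl_congr_mem _ _
      (fun ans i => if (!(subB i).isEmpty) = true then ans ++ [subB i] else ans) []
      (by
        intro acc i _
        simp only []
        split_ifs with h1 h2 <;> simp_all)]
  rw [PySem.List.foldl_append_if (fun i => !(subB i).isEmpty) subB _ [], List.nil_append]
  have hfeq : ∀ i ∈ PySem.List.pyRange 1 ((cs.length : Int) + 1) 1, subB i = pvF cs i := by
    intro i hi
    rw [PySem.List.mem_pyRange_one] at hi
    obtain ⟨ii, rfl⟩ : ∃ ii : Nat, i = (ii : Int) := ⟨i.toNat, by omega⟩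
    have hii : 1 ≤ ii := by exact_mod_cast hi.1
    unfold pvF
    rw [List.filter_map, List.map_map, hsubB]
    simp only []
    congr 1
    apply List.filter_congr
    intro a hamem
    have hpos : (0 : Int) < (ii : Int) := by exact_mod_cast hii
    rw [PySem.List.mem_pyRange_iff_of_pos hpos] at hamem
    obtain ⟨aa, rfl⟩ : ∃ aa : Nat, a = (aa : Int) := ⟨a.toNat, by omega⟩
    have haa : aa < cs.length := by exact_mod_cast hamem.2.1
    simp only [Function.comp_apply]
    exact lookup_eq cs aa ii haa hii
  rw [List.filter_congr (fun i hi => by rw [hfeq i hi])]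
  apply List.map_congr_left
  intro i hi
  exact hfeq i (List.mem_of_mem_filter hi)

-- ===== VERDICT (by name: the statement is the Claim_ definition above) =====
theorem partition_fail_spec : Claim_equal_partition_fail := by
  intro s _
  unfold Spec_partition_fail
  rw [A_eq_mid s, B_eq_mid s]
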